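-- pv_equiv track=rewrite | github.com/shawnghu/p_euler | 128/128.py | generate_candidate_numbers_up_to
-- ===== SOURCE A (Python) =====
-- def generate_candidate_numbers_up_to(n):
--     yield 2
--     yield 7
--     parity = True
--     layer_number = 1
--     while True:
--         if parity:
--             # do first number in layer
--             x = layer_number * (layer_number + 1) * 3 + 2
--             yield x
--             parity = False
--             continue
--         else:
--             # do last number in layer
--             x = (layer_number + 1) * (layer_number + 2) * 3 + 1
--             yield x
--             parity = True
--             layer_number += 1
--         if x > n:
--             break
-- ===== SOURCE B (Python) =====
-- def generate_candidate_numbers_up_to(n):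
--     # count layers first: k = least layer whose last number exceeds n (at least 1)
--     yield 2
--     yield 7
--     k = 1
--     while (k + 1) * (k + 2) * 3 + 1 <= n:
--         k += 1
--     for L in range(1, k + 1):
--         yield L * (L + 1) * 3 + 2
--         yield (L + 1) * (L + 2) * 3 + 1
-- ===== Notes on version B (the rewrite author's own statement) =====
-- stated objective: alternative
-- what changed: B drops A's parity state machine: it first counts the layers with a simple while loop, then emits both numbers of each layer from the closed-form per-layer formulas over a range.
import Mathlib
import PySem

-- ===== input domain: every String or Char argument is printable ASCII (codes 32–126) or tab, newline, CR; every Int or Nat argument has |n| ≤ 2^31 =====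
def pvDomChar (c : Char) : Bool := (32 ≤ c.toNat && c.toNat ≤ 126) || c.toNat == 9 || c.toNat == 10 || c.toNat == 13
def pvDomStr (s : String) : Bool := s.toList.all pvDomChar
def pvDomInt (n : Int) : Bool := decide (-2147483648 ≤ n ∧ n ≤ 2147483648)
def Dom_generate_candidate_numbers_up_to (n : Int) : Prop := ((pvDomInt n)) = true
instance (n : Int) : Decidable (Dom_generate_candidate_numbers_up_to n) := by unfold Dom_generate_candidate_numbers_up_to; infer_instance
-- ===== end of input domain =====

-- B replaces A's parity state machine by a layer-count loop followed by closed-form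
-- emission of both numbers per layer over a range (objective: alternative).


-- ===== PORT A =====
-- A's 'while True' loop with the 'parity' toggle; layer_number starts at 1 in Python and
-- only increments, so it is a Nat (cast to Int for the arithmetic).  The 'fuel' argument is
-- only a totality guard (one unit per loop iteration); the call below passes enough fuel,
-- and pvALoop_eq below shows the fuel branch is never reached from that call.
def pvALoop (n : Int) : Nat → Bool → Nat → List Int
  | 0, _, _ => []
  | fuel + 1, true, layer_number =>
      -- do first number in layer; 'continue' skips the break check
      ((layer_number : Int) * ((layer_number : Int) + 1) * 3 + 2) ::
        pvALoop n fuel false layer_number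
  | fuel + 1, false, layer_number =>
      -- do last number in layer, then the 'if x > n: break' check
      (((layer_number : Int) + 1) * ((layer_number : Int) + 2) * 3 + 1) ::
        (if ((layer_number : Int) + 1) * ((layer_number : Int) + 2) * 3 + 1 > n then []
         else pvALoop n fuel true (layer_number + 1))

def generate_candidate_numbers_up_to (n : Int) : List Int :=
  2 :: 7 :: pvALoop n (2 * n.toNat + 2) true 1

-- ===== PORT B =====
-- the counting 'while' loop of Source B; k starts at 1 and only increments, so it is a Nat;
-- 'fuel' is again only a totality guard, with enough passed below (pvBCount_stop /
-- pvALoop_eq below show the result does not depend on it)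
def pvBCount (n : Int) : Nat → Nat → Nat
  | 0, k => k
  | fuel + 1, k =>
      if ((k : Int) + 1) * ((k : Int) + 2) * 3 + 1 ≤ n then pvBCount n fuel (k + 1) else k

-- Source B: yield 2, yield 7, then both numbers of each layer L = 1 .. k from the formulas
def generate_candidate_numbers_up_to_alt (n : Int) : List Int :=
  2 :: 7 ::
    (PySem.List.pyRange 1 ((pvBCount n n.toNat 1 : Int) + 1) 1).flatMap
      (fun L => [L * (L + 1) * 3 + 2, (L + 1) * (L + 2) * 3 + 1])

-- ===== PRECONDITION & SPEC =====
def Spec_generate_candidate_numbers_up_to (n : Int) (out : List Int) : Prop := out = generate_candidate_numbers_up_to_alt n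
instance (n : Int) (out : List Int) : Decidable (Spec_generate_candidate_numbers_up_to n out) := by unfold Spec_generate_candidate_numbers_up_to; infer_instance

-- ===== CLAIM (what is proved, stated in full; the proofs are below) =====
def Claim_equal_generate_candidate_numbers_up_to : Prop := ∀ (n : Int), Dom_generate_candidate_numbers_up_to n → Spec_generate_candidate_numbers_up_to n (generate_candidate_numbers_up_to n)

-- ===== LEMMAS AND PROOFS =====

-- if the last number of layer k still fits under n, then k < n
theorem pv_guard_lt (n : Int) (k : Nat)
    (h : ((k : Int) + 1) * ((k : Int) + 2) * 3 + 1 ≤ n) : (k : Int) < n := by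
  nlinarith [Int.natCast_nonneg k, mul_self_nonneg (k : Int)]

theorem pvBCount_ge (n : Int) (g k : Nat) : k ≤ pvBCount n g k := by
  induction g generalizing k with
  | zero => simp [pvBCount]
  | succ g ih =>
    simp only [pvBCount]
    split
    · exact le_trans (Nat.le_succ k) (ih (k + 1))
    · exact le_refl k

theorem pvBCount_stop (n : Int) (g k : Nat)
    (hg : ¬ ((k : Int) + 1) * ((k : Int) + 2) * 3 + 1 ≤ n) : pvBCount n g k = k := by
  cases g <;> simp [pvBCount, hg]

theorem pvBCount_step (n : Int) (g k : Nat)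
    (hg : ((k : Int) + 1) * ((k : Int) + 2) * 3 + 1 ≤ n) :
    pvBCount n (g + 1) k = pvBCount n g (k + 1) := by
  simp [pvBCount, hg]

theorem pvALoop_stop (n : Int) (g k : Nat)
    (hg : ¬ ((k : Int) + 1) * ((k : Int) + 2) * 3 + 1 ≤ n) :
    pvALoop n (g + 2) true k =
      [(k : Int) * ((k : Int) + 1) * 3 + 2, ((k : Int) + 1) * ((k : Int) + 2) * 3 + 1] := by
  simp [pvALoop, lt_of_not_ge hg]

theorem pvALoop_step (n : Int) (g k : Nat)
    (hg : ((k : Int) + 1) * ((k : Int) + 2) * 3 + 1 ≤ n) :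
    pvALoop n (g + 2) true k =
      ((k : Int) * ((k : Int) + 1) * 3 + 2) ::
        (((k : Int) + 1) * ((k : Int) + 2) * 3 + 1) :: pvALoop n g true (k + 1) := by
  simp [pvALoop, not_lt.mpr hg]

theorem pvALoop_eq (n : Int) : ∀ (m k ga gb : Nat), n.toNat - k = m →
    2 * m + 2 ≤ ga → m ≤ gb →
    pvALoop n ga true k =
      (PySem.List.pyRange (k : Int) ((pvBCount n gb k : Int) + 1) 1).flatMap
        (fun L => [L * (L + 1) * 3 + 2, (L + 1) * (L + 2) * 3 + 1]) := by
  intro m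
  induction m with
  | zero =>
    intro k ga gb hm hga _hgb
    obtain ⟨g, rfl⟩ : ∃ g, ga = g + 2 := ⟨ga - 2, by omega⟩
    have hg : ¬ ((k : Int) + 1) * ((k : Int) + 2) * 3 + 1 ≤ n := by
      intro h
      have h1 : (k : Int) < n := pv_guard_lt n k h
      have h2 : n ≤ (n.toNat : Int) := Int.self_le_toNat n
      have h3 : (k : Int) < (n.toNat : Int) := lt_of_lt_of_le h1 h2
      omega
    rw [pvALoop_stop n g k hg, pvBCount_stop n gb k hg,
      PySem.List.pyRange_one_singleton]
    simp [List.flatMap]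
  | succ m ih =>
    intro k ga gb hm hga hgb
    obtain ⟨g, rfl⟩ : ∃ g, ga = g + 2 := ⟨ga - 2, by omega⟩
    obtain ⟨g', rfl⟩ : ∃ g', gb = g' + 1 := ⟨gb - 1, by omega⟩
    by_cases hg : ((k : Int) + 1) * ((k : Int) + 2) * 3 + 1 ≤ n
    · have h1 : (k : Int) < n := pv_guard_lt n k hg
      have hk : k < n.toNat := by omega
      have hm' : n.toNat - (k + 1) = m := by omega
      rw [pvALoop_step n g k hg, pvBCount_step n g' k hg,
        ih (k + 1) g (g') hm' (by omega) (by omega)]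
      have hKb : k + 1 ≤ pvBCount n g' (k + 1) := pvBCount_ge n g' (k + 1)
      have hlt : (k : Int) < (pvBCount n g' (k + 1) : Int) + 1 := by
        have : ((k : Nat) : Int) + 1 ≤ (pvBCount n g' (k + 1) : Int) := by exact_mod_cast hKb
        omega
      rw [PySem.List.pyRange_one_cons hlt]
      simp only [List.flatMap_cons]
      push_cast
      rfl
    · rw [pvALoop_stop n g k hg, pvBCount_stop n (g' + 1) k hg,
        PySem.List.pyRange_one_singleton]
      simp [List.flatMap]

-- ===== VERDICT (by name: the statement is the Claim_ definition above) =====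
theorem generate_candidate_numbers_up_to_spec : Claim_equal_generate_candidate_numbers_up_to := by
  intro n _
  show _ = _
  rw [generate_candidate_numbers_up_to, generate_candidate_numbers_up_to_alt,
    pvALoop_eq n (n.toNat - 1) 1 (2 * n.toNat + 2) n.toNat rfl (by omega) (by omega)]
  norm_num
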